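-- pv_equiv track=rewrite | github.com/dgtlmoon/changedetection.io | changedetectionio/diff/tokenizers/natural_text.py | tokenize_words
-- ===== SOURCE A (Python) =====
-- from typing import List
--
-- def tokenize_words(text: str) -> List[str]:
--     """
--     Split text into words using simple whitespace boundaries.
--
--     This is a simpler tokenizer that treats all whitespace as token boundaries
--     without special handling for HTML tags.
--
--     Args:
--         text: Input text to tokenize
--
--     Returns:
--         List of tokens (words and whitespace)
--
--     Examples:
--         >>> tokenize_words("Hello world")
--         ['Hello', ' ', 'world']
--         >>> tokenize_words("one  two")
--         ['one', ' ', ' ', 'two']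
--     """
--     tokens = []
--     current = ''
--
--     for char in text:
--         if char.isspace():
--             if current:
--                 tokens.append(current)
--                 current = ''
--             tokens.append(char)
--         else:
--             current += char
--
--     if current:
--         tokens.append(current)
--     return tokens
-- ===== SOURCE B (Python) =====
-- from typing import List
--
-- def tokenize_words(text: str) -> List[str]:
--     """Run-scanning tokenizer: whitespace chars are emitted one by one,
--     maximal non-whitespace runs are emitted as word slices."""
--     tokens = []
--     i = 0
--     n = len(text)
--     while i < n:
--         if text[i].isspace():
--             tokens.append(text[i])
--             i += 1
--         else:
--             j = i + 1
--             while j < n and not text[j].isspace():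
--                 j += 1
--             tokens.append(text[i:j])
--             i = j
--     return tokens
-- ===== Notes on version B (the rewrite author's own statement) =====
-- stated objective: alternative
-- what changed: Replaces A's per-character accumulator/flush state machine with a run-scanning pass: whitespace chars are emitted one by one, each maximal non-whitespace run is found by an inner scan and emitted as a single slice.
import Mathlib
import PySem

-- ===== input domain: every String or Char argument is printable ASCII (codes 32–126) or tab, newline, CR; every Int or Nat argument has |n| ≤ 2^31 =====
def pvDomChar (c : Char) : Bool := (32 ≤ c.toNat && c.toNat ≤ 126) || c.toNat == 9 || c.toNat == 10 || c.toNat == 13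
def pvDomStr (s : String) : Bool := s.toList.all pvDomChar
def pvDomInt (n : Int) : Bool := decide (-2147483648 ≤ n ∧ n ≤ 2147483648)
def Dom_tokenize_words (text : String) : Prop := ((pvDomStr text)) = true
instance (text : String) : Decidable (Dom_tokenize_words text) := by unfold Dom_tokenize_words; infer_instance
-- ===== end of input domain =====

-- B replaces A's per-character accumulator state machine by a run-scanning pass
-- (emit each whitespace char; emit each maximal non-whitespace run as a slice); same output.

-- ===== PORT A =====
-- A's loop state: (tokens built so far, current word buffer); current += char is buffer ++ [c].
def tokAStep (st : List String × List Char) (c : Char) : List String × List Char :=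
  if PySem.Chars.isspace c then
    (st.1 ++ (if st.2 ≠ [] then [String.ofList st.2, String.ofList [c]] else [String.ofList [c]]), [])
  else
    (st.1, st.2 ++ [c])

def tokenize_words (text : String) : List String :=
  let st := text.toList.foldl tokAStep ([], [])
  if st.2 ≠ [] then st.1 ++ [String.ofList st.2] else st.1

-- ===== PORT B =====
-- Source B's outer while loop as recursion on the remaining characters; a whitespace char is
-- emitted alone, a non-whitespace run (the inner 'while j' scan = takeWhile/dropWhile) as one word.
def tokB : List Char → List String
  | [] => []
  | c :: cs =>
    if PySem.Chars.isspace c then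
      String.ofList [c] :: tokB cs
    else
      String.ofList (c :: cs.takeWhile (fun x => ¬ PySem.Chars.isspace x)) ::
        tokB (cs.dropWhile (fun x => ¬ PySem.Chars.isspace x))
termination_by cs => cs.length
decreasing_by
  · simp
  · exact Nat.lt_succ_of_le (List.length_dropWhile_le _ _)

def tokenize_words_alt (text : String) : List String := tokB text.toList

-- ===== PRECONDITION & SPEC =====
def Spec_tokenize_words (text : String) (out : List String) : Prop := out = tokenize_words_alt text
instance (text : String) (out : List String) : Decidable (Spec_tokenize_words text out) := by unfold Spec_tokenize_words; infer_instance

-- ===== CLAIM (what is proved, stated in full; the proofs are below) =====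
def Claim_equal_tokenize_words : Prop := ∀ (text : String), Dom_tokenize_words text → Spec_tokenize_words text (tokenize_words text)

-- ===== LEMMAS AND PROOFS =====

-- What B produces when A's loop starts with word buffer `cur` still open.
def tokBC (cur : List Char) (cs : List Char) : List String :=
  if cur ≠ [] then
    String.ofList (cur ++ cs.takeWhile (fun x => ¬ PySem.Chars.isspace x)) ::
      tokB (cs.dropWhile (fun x => ¬ PySem.Chars.isspace x))
  else tokB cs

theorem tokA_loop (cs : List Char) : ∀ (tokens : List String) (cur : List Char),
    (let st := cs.foldl tokAStep (tokens, cur)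
     if st.2 ≠ [] then st.1 ++ [String.ofList st.2] else st.1) = tokens ++ tokBC cur cs := by
  induction cs with
  | nil =>
    intro tokens cur
    by_cases h : cur = [] <;> simp [tokBC, tokB, h]
  | cons c cs ih =>
    intro tokens cur
    by_cases hs : PySem.Chars.isspace c
    · by_cases h : cur = [] <;>
        simp [List.foldl_cons, tokAStep, hs, h, ih, tokBC, tokB]
    · by_cases h : cur = [] <;>
        simp [List.foldl_cons, tokAStep, hs, h, ih, tokBC, tokB, List.takeWhile, List.dropWhile]

-- ===== VERDICT (by name: the statement is the Claim_ definition above) =====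
theorem tokenize_words_spec : Claim_equal_tokenize_words := by
  intro text _
  unfold Spec_tokenize_words tokenize_words tokenize_words_alt
  simpa [tokBC] using tokA_loop text.toList [] []
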